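-- pv_equiv track=rewrite | github.com/MCaburrasi/Programacion | src/Python/UD3 - Funciones/Teoría/actividad5.py | tarjeta_oculta
-- ===== SOURCE A (Python) =====
-- def tarjeta_oculta(numero, asteriscos=12):
--     oculto = asteriscos * '*'
--     censura = asteriscos
--
--     for i in numero:
--         if censura <= 0:
--             oculto += i
--         censura -= 1
--
--     return oculto
-- ===== SOURCE B (Python) =====
-- def tarjeta_oculta(numero, asteriscos=12):
--     # closed form: stars then the unmasked tail (slice start guarded for non-positive counts)
--     return asteriscos * '*' + (numero[asteriscos:] if asteriscos > 0 else numero)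
-- ===== Notes on version B (the rewrite author's own statement) =====
-- stated objective: idiomatic
-- what changed: Replaces the per-character counting loop with a closed-form expression: star repetition concatenated with a slice of the tail (start clamped to 0 for non-positive counts).
import Mathlib
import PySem

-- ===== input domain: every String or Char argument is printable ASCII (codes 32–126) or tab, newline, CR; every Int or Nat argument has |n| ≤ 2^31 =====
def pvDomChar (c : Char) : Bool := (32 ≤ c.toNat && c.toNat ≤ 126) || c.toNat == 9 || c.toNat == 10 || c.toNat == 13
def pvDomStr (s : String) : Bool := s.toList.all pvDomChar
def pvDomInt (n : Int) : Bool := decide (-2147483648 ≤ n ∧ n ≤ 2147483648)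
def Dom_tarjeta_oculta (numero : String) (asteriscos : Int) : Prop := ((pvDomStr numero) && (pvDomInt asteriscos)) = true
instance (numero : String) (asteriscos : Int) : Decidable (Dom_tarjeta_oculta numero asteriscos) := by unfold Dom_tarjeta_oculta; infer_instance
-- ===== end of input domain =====

-- B replaces A's per-character counting loop with a closed form: stars ++ clamped tail slice (idiomatic; same cost).

-- ===== PORT A =====
def tarjeta_oculta (numero : String) (asteriscos : Int) : String :=
  let oculto := PySem.List.pyRepeat ['*'] asteriscos   -- asteriscos * '*'
  let r := numero.toList.foldl
    (fun (st : List Char × Int) i =>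
      ((if st.2 ≤ 0 then st.1 ++ [i] else st.1), st.2 - 1))
    (oculto, asteriscos)
  String.ofList r.1

-- ===== PORT B =====
def tarjeta_oculta_alt (numero : String) (asteriscos : Int) : String :=
  String.ofList (PySem.List.pyRepeat ['*'] asteriscos ++
    (if asteriscos > 0 then PySem.List.slice numero.toList (some asteriscos) none
     else numero.toList))

-- ===== PRECONDITION & SPEC =====
def Spec_tarjeta_oculta (numero : String) (asteriscos : Int) (out : String) : Prop := out = tarjeta_oculta_alt numero asteriscos
instance (numero : String) (asteriscos : Int) (out : String) : Decidable (Spec_tarjeta_oculta numero asteriscos out) := by unfold Spec_tarjeta_oculta; infer_instance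

-- ===== CLAIM (what is proved, stated in full; the proofs are below) =====
def Claim_equal_tarjeta_oculta : Prop := ∀ (numero : String) (asteriscos : Int), Dom_tarjeta_oculta numero asteriscos → Spec_tarjeta_oculta numero asteriscos (tarjeta_oculta numero asteriscos)

-- ===== LEMMAS AND PROOFS =====

/-- A's loop appended exactly the characters of `l` past position `c.toNat`. -/
theorem tarjeta_fold (l : List Char) (acc : List Char) (c : Int) :
    (l.foldl (fun (st : List Char × Int) i =>
        ((if st.2 ≤ 0 then st.1 ++ [i] else st.1), st.2 - 1)) (acc, c)).1
      = acc ++ l.drop c.toNat := by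
  induction l generalizing acc c with
  | nil => simp
  | cons x xs ih =>
    by_cases h : c ≤ 0
    · simp only [List.foldl_cons, if_pos h, ih]
      have h0 : c.toNat = 0 := Int.toNat_of_nonpos h
      have h1 : (c - 1).toNat = 0 := Int.toNat_of_nonpos (by omega)
      simp [h0, h1]
    · simp only [List.foldl_cons, if_neg h, ih]
      have hc : c.toNat = (c - 1).toNat + 1 := by omega
      rw [hc, List.drop_succ_cons]

-- ===== VERDICT (by name: the statement is the Claim_ definition above) =====
theorem tarjeta_oculta_spec : Claim_equal_tarjeta_oculta := by
  intro numero asteriscos _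
  unfold Spec_tarjeta_oculta tarjeta_oculta tarjeta_oculta_alt
  simp only [tarjeta_fold]
  by_cases h : asteriscos > 0
  · rw [if_pos h, PySem.List.slice_from numero.toList (show (0:Int) ≤ asteriscos from by omega)]
  · rw [if_neg h]
    have : asteriscos.toNat = 0 := Int.toNat_of_nonpos (by omega)
    simp [this]
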